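-- pv_equiv track=rewrite | github.com/harborgrid-justin/white-cross | test-all-endpoints.py | replace_path_params
-- ===== SOURCE A (Python) =====
-- def replace_path_params(path):
--     """Replace path parameters with test values"""
--     replacements = {
--         '{id}': '1',
--         '{studentId}': '1',
--         '{medicationId}': '1',
--         '{appointmentId}': '1',
--         '{userId}': '1',
--         '{recordId}': '1',
--         '{reportId}': '1',
--         '{contactId}': '1',
--         '{incidentId}': '1',
--         '{itemId}': '1',
--         '{vendorId}': '1',
--         '{orderId}': '1',
--         '{messageId}': '1',
--         '{broadcastId}': '1',
--         '{documentId}': '1',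
--         '{roleId}': '1',
--         '{permissionId}': '1',
--         '{districtId}': '1',
--         '{schoolId}': '1',
--         '{administrationId}': '1',
--         '{logId}': '1',
--         '{assessmentId}': '1',
--     }
--
--     test_path = path
--     for param, value in replacements.items():
--         test_path = test_path.replace(param, value)
--     return test_path
-- ===== SOURCE B (Python) =====
-- import re
--
--
-- def replace_path_params(path):
--     """Replace path parameters with test values (one regex pass)."""
--     return re.sub(
--         r'\{(?:id|studentId|medicationId|appointmentId|userId|recordId'
--         r'|reportId|contactId|incidentId|itemId|vendorId|orderId|messageId'
--         r'|broadcastId|documentId|roleId|permissionId|districtId|schoolId'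
--         r'|administrationId|logId|assessmentId)\}',
--         '1', path)
-- ===== Notes on version B (the rewrite author's own statement) =====
-- stated objective: idiomatic
-- what changed: A makes 22 sequential str.replace passes over the path, one per placeholder; B makes a single left-to-right pass with one re.sub whose pattern is an alternation of exactly the 22 placeholder names, substituting the test value for each match.
import Mathlib
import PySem

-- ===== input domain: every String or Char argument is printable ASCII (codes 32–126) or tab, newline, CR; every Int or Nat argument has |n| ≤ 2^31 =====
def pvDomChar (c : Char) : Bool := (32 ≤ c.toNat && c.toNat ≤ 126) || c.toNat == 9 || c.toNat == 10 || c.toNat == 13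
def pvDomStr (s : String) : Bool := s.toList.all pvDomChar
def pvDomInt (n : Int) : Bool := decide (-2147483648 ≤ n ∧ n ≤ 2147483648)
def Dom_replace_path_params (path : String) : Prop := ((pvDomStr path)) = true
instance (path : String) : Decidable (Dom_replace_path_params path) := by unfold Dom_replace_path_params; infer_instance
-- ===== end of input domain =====

-- B replaces A's 22 sequential str.replace passes by a single left-to-right scan
-- (one re.sub over an alternation of exactly the 22 placeholder names): idiomatic, one pass.


-- ===== PORT A =====
-- the dict literal becomes an association list (insertion order); the loop a foldl
def replace_path_params (path : String) : String :=
  let replacements : List (String × String) :=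
    [("{id}", "1"), ("{studentId}", "1"), ("{medicationId}", "1"),
     ("{appointmentId}", "1"), ("{userId}", "1"), ("{recordId}", "1"),
     ("{reportId}", "1"), ("{contactId}", "1"), ("{incidentId}", "1"),
     ("{itemId}", "1"), ("{vendorId}", "1"), ("{orderId}", "1"),
     ("{messageId}", "1"), ("{broadcastId}", "1"), ("{documentId}", "1"),
     ("{roleId}", "1"), ("{permissionId}", "1"), ("{districtId}", "1"),
     ("{schoolId}", "1"), ("{administrationId}", "1"), ("{logId}", "1"),
     ("{assessmentId}", "1")]
  replacements.foldl (fun test_path pv => PySem.Str.replace test_path pv.1 pv.2) path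

-- ===== PORT B =====
-- the 22 literal alternatives of B's regex, in the pattern's order
def pvPats : List (List Char) :=
  ["{id}".toList, "{studentId}".toList, "{medicationId}".toList,
   "{appointmentId}".toList, "{userId}".toList, "{recordId}".toList,
   "{reportId}".toList, "{contactId}".toList, "{incidentId}".toList,
   "{itemId}".toList, "{vendorId}".toList, "{orderId}".toList,
   "{messageId}".toList, "{broadcastId}".toList, "{documentId}".toList,
   "{roleId}".toList, "{permissionId}".toList, "{districtId}".toList,
   "{schoolId}".toList, "{administrationId}".toList, "{logId}".toList,
   "{assessmentId}".toList]

-- hand port of re.sub(pattern, '1', path) for a pattern that is an alternation of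
-- the literal strings pvPats: leftmost scan, at each position the first alternative
-- that matches is replaced and the scan resumes after it (exact for these literals:
-- none contains '}' before its final char, so no regex backtracking is observable);
-- fuel = length of the scanned text, each step consumes at least one character
def pvSubGo : Nat → List Char → List Char
  | _, [] => []
  | 0, l => l
  | fuel + 1, c :: t =>
    match pvPats.find? (fun q => q.isPrefixOf (c :: t)) with
    | some q => '1' :: pvSubGo fuel (t.drop (q.length - 1))
    | none => c :: pvSubGo fuel t

def replace_path_params_alt (path : String) : String :=
  String.ofList (pvSubGo path.toList.length path.toList)

-- ===== PRECONDITION & SPEC =====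
def Spec_replace_path_params (path : String) (out : String) : Prop := out = replace_path_params_alt path
instance (path : String) (out : String) : Decidable (Spec_replace_path_params path out) := by unfold Spec_replace_path_params; infer_instance

-- ===== CLAIM (what is proved, stated in full; the proofs are below) =====
def Claim_equal_replace_path_params : Prop := ∀ (path : String), Dom_replace_path_params path → Spec_replace_path_params path (replace_path_params path)

-- ===== LEMMAS AND PROOFS =====

-- single-pattern replacement by '1' as a direct scan (characterises Chars.replace)
def pvRep1 (p : List Char) : List Char → List Char
  | [] => []
  | c :: t =>
    if p.isPrefixOf (c :: t) then '1' :: pvRep1 p (t.drop (p.length - 1))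
    else c :: pvRep1 p t
termination_by l => l.length
decreasing_by all_goals simp

-- multi-pattern leftmost scan for an arbitrary pattern list (generalises pvSubGo)
def pvScanS (S : List (List Char)) : List Char → List Char
  | [] => []
  | c :: t =>
    match S.find? (fun q => q.isPrefixOf (c :: t)) with
    | some q => '1' :: pvScanS S (t.drop (q.length - 1))
    | none => c :: pvScanS S t
termination_by l => l.length
decreasing_by all_goals simp

-- shape of every pattern: '{' then a body free of '{' and '1'
def pvPatOk (q : List Char) : Bool :=
  match q with
  | c :: pu => c == '{' && !pu.contains '{' && !pu.contains '1'
  | [] => false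

theorem pvPats_ok : ∀ q ∈ pvPats, pvPatOk q = true := by decide

theorem pv_go_spec (p : List Char) (hp : p ≠ []) :
    ∀ (fuel : Nat) (l acc : List Char), l.length ≤ fuel →
      PySem.Chars.replace.go p ['1'] fuel l acc = acc.reverse ++ pvRep1 p l := by
  intro fuel
  induction fuel with
  | zero =>
    intro l acc hl
    have hnil : l = [] := List.eq_nil_of_length_eq_zero (Nat.le_zero.mp hl)
    subst hnil
    rw [PySem.Chars.replace.go.eq_def]
    simp [pvRep1]
  | succ fuel ih =>
    intro l acc hl
    cases l with
    | nil =>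
      rw [PySem.Chars.replace.go.eq_def]
      simp [pvRep1]
    | cons c t =>
      rw [PySem.Chars.replace.go.eq_def]
      obtain ⟨a, p', rfl⟩ : ∃ a p', p = a :: p' := by
        cases p with
        | nil => exact absurd rfl hp
        | cons a p' => exact ⟨a, p', rfl⟩
      by_cases hpre : (a :: p').isPrefixOf (c :: t) = true
      · simp only [hpre, if_true]
        rw [ih]
        · rw [pvRep1]
          simp [hpre, List.drop_succ_cons]
        · simp only [List.length_cons] at hl ⊢
          simp [List.length_drop]
          omega
      · simp only [Bool.not_eq_true] at hpre
        simp only [hpre, Bool.false_eq_true, if_false]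
        rw [ih t (c :: acc) (by simp at hl ⊢; omega)]
        rw [pvRep1]
        simp [hpre]

theorem pv_replace_eq_rep1 (p : List Char) (hp : p ≠ []) (l : List Char) :
    PySem.Chars.replace l p ['1'] = pvRep1 p l := by
  rw [PySem.Chars.replace]
  rw [if_neg (by simpa [List.isEmpty_iff] using hp)]
  rw [pv_go_spec p hp l.length l [] (le_refl _)]
  simp

-- a prefix free of '{' is passed through unchanged by the scan
-- patterns all start with '{', so at a head other than '{' nothing matches
theorem pv_find_none (S : List (List Char)) (hS : ∀ q ∈ S, pvPatOk q = true)
    (c : Char) (t : List Char) (hc : c ≠ '{') :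
    S.find? (fun q => q.isPrefixOf (c :: t)) = none := by
  rw [List.find?_eq_none]
  intro q hq
  have hok := hS q hq
  cases q with
  | nil => simp [pvPatOk] at hok
  | cons a pu =>
    simp [pvPatOk] at hok
    obtain ⟨⟨ha, -⟩, -⟩ := hok
    subst ha
    simp [List.isPrefixOf]
    intro h
    exact absurd h.symm hc

theorem pv_scan_untouched (S : List (List Char)) (hS : ∀ q ∈ S, pvPatOk q = true) :
    ∀ (u t : List Char), '{' ∉ u → u <+: t →
      pvScanS S t = u ++ pvScanS S (t.drop u.length) := by
  intro u
  induction u with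
  | nil => intro t _ _; simp
  | cons d u' ih =>
    intro t hcon hpre
    cases t with
    | nil => exact absurd hpre (by simp)
    | cons e t' =>
      rw [List.cons_prefix_cons] at hpre
      obtain ⟨rfl, hpre'⟩ := hpre
      simp only [List.mem_cons, not_or] at hcon
      have hd : d ≠ '{' := fun h => hcon.1 h.symm
      rw [pvScanS, pv_find_none S hS d t' hd]
      simp only [List.length_cons, List.drop_succ_cons, List.cons_append]
      rw [ih t' hcon.2 hpre']

-- a prefix of the scan's output free of '{' and '1' was a prefix of the input
theorem pv_scan_reflect (S : List (List Char)) :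
    ∀ (t u : List Char), '{' ∉ u → '1' ∉ u →
      u <+: pvScanS S t → u <+: t := by
  intro t
  induction t with
  | nil =>
    intro u _ _ h
    rw [pvScanS] at h
    simpa using h
  | cons c t' ih =>
    intro u hb h1 hpre
    rw [pvScanS] at hpre
    cases hfind : List.find? (fun q => q.isPrefixOf (c :: t')) S with
    | some q =>
      rw [hfind] at hpre
      cases u with
      | nil => simp
      | cons d u' =>
        rw [List.cons_prefix_cons] at hpre
        obtain ⟨rfl, -⟩ := hpre
        exact absurd (List.mem_cons_self) h1
    | none =>
      rw [hfind] at hpre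
      cases u with
      | nil => simp
      | cons d u' =>
        rw [List.cons_prefix_cons] at hpre
        obtain ⟨rfl, hpre'⟩ := hpre
        simp only [List.mem_cons, not_or] at hb h1
        exact List.cons_prefix_cons.mpr ⟨rfl, ih u' hb.2 h1.2 hpre'⟩

-- replacing one more pattern after scanning for S = scanning for S ++ [p]
theorem pv_step (p : List Char) (hp : pvPatOk p = true)
    (S : List (List Char)) (hS : ∀ q ∈ S, pvPatOk q = true) :
    ∀ (l : List Char), pvRep1 p (pvScanS S l) = pvScanS (S ++ [p]) l := by
  suffices H : ∀ (N : Nat) (l : List Char), l.length ≤ N →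
      pvRep1 p (pvScanS S l) = pvScanS (S ++ [p]) l from
    fun l => H l.length l (le_refl _)
  intro N
  induction N with
  | zero =>
    intro l hl
    have hnil : l = [] := List.eq_nil_of_length_eq_zero (Nat.le_zero.mp hl)
    subst hnil
    rw [pvScanS, pvScanS, pvRep1]
  | succ N ih =>
    intro l hl
    cases l with
    | nil => rw [pvScanS, pvScanS, pvRep1]
    | cons c t =>
      obtain ⟨pu, rfl, hpu1, hpu2⟩ :
          ∃ pu, p = '{' :: pu ∧ '{' ∉ pu ∧ '1' ∉ pu := by
        cases p with
        | nil => simp [pvPatOk] at hp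
        | cons a pu =>
          simp [pvPatOk] at hp
          exact ⟨pu, by rw [hp.1.1], hp.1.2, hp.2⟩
      simp only [List.length_cons] at hl
      cases hfind : List.find? (fun q => q.isPrefixOf (c :: t)) S with
      | some q =>
        have hL : pvScanS S (c :: t) = '1' :: pvScanS S (t.drop (q.length - 1)) := by
          rw [pvScanS, hfind]
        have hR : pvScanS (S ++ ['{' :: pu]) (c :: t) =
            '1' :: pvScanS (S ++ ['{' :: pu]) (t.drop (q.length - 1)) := by
          rw [pvScanS, List.find?_append, hfind]
          rfl
        rw [hL, hR, pvRep1]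
        rw [if_neg (by simp [List.isPrefixOf])]
        have hlen : (t.drop (q.length - 1)).length ≤ N := by
          simp [List.length_drop]; omega
        rw [ih (t.drop (q.length - 1)) hlen]
      | none =>
        have hL : pvScanS S (c :: t) = c :: pvScanS S t := by
          rw [pvScanS, hfind]
        by_cases hpm : ('{' :: pu).isPrefixOf (c :: t) = true
        · have hpre := List.isPrefixOf_iff_prefix.mp hpm
          rw [List.cons_prefix_cons] at hpre
          obtain ⟨hc, hput⟩ := hpre
          subst hc
          have hR : pvScanS (S ++ ['{' :: pu]) ('{' :: t) =
              '1' :: pvScanS (S ++ ['{' :: pu]) (t.drop (('{' :: pu).length - 1)) := by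
            rw [pvScanS, List.find?_append, hfind]
            simp only [Option.none_or]
            have hfs : List.find? (fun q => q.isPrefixOf ('{' :: t)) ['{' :: pu] =
                some ('{' :: pu) := List.find?_cons_of_pos hpm
            rw [hfs]
          rw [hL, hR]
          rw [pv_scan_untouched S hS pu t hpu1 hput, pvRep1]
          rw [if_pos (by
            rw [List.isPrefixOf_iff_prefix]
            exact List.cons_prefix_cons.mpr ⟨rfl, List.prefix_append _ _⟩)]
          simp only [List.length_cons, Nat.add_sub_cancel, List.drop_left]
          have hlen : (t.drop pu.length).length ≤ N := by
            simp [List.length_drop]; omega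
          rw [ih (t.drop pu.length) hlen]
        · have hR : pvScanS (S ++ ['{' :: pu]) (c :: t) = c :: pvScanS (S ++ ['{' :: pu]) t := by
            rw [pvScanS, List.find?_append, hfind]
            simp only [Option.none_or]
            have hfs : List.find? (fun q => q.isPrefixOf (c :: t)) ['{' :: pu] = none := by
              rw [List.find?_eq_none]
              intro x hx
              simp only [List.mem_singleton] at hx
              subst hx
              exact hpm
            rw [hfs]
          rw [hL, hR, pvRep1]
          have hnp : ('{' :: pu).isPrefixOf (c :: pvScanS S t) = false := by
            by_contra h
            rw [Bool.not_eq_false, List.isPrefixOf_iff_prefix, List.cons_prefix_cons] at h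
            obtain ⟨hc, hput⟩ := h
            exact hpm (List.isPrefixOf_iff_prefix.mpr (List.cons_prefix_cons.mpr
              ⟨hc, pv_scan_reflect S t pu hpu1 hpu2 hput⟩))
          rw [if_neg (by simp [hnp])]
          rw [ih t (by omega)]

theorem pv_scan_nil : ∀ (l : List Char), pvScanS [] l = l := by
  intro l
  induction l with
  | nil => rw [pvScanS]
  | cons c t ih => rw [pvScanS, List.find?_nil, ih]

theorem pv_fold (R : List (List Char)) :
    ∀ (S : List (List Char)), (∀ q ∈ R, pvPatOk q = true) → (∀ q ∈ S, pvPatOk q = true) →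
      ∀ l, R.foldl (fun t p => pvRep1 p t) (pvScanS S l) = pvScanS (S ++ R) l := by
  induction R with
  | nil => intro S _ _ l; simp
  | cons p R' ih =>
    intro S hR hS l
    simp only [List.foldl_cons]
    rw [pv_step p (hR p (by simp)) S hS l]
    rw [ih (S ++ [p]) (fun q hq => hR q (by simp [hq]))
      (by intro q hq; rcases List.mem_append.mp hq with h | h
          · exact hS q h
          · simp at h; subst h; exact hR q (by simp)) l]
    simp

theorem pv_subGo_eq_scan : ∀ (fuel : Nat) (l : List Char), l.length ≤ fuel →
    pvSubGo fuel l = pvScanS pvPats l := by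
  intro fuel
  induction fuel with
  | zero =>
    intro l hl
    have hnil : l = [] := List.eq_nil_of_length_eq_zero (Nat.le_zero.mp hl)
    subst hnil
    rw [pvScanS]
    rfl
  | succ fuel ih =>
    intro l hl
    cases l with
    | nil => rw [pvScanS]; rfl
    | cons c t =>
      simp only [List.length_cons] at hl
      rw [pvScanS]
      simp only [pvSubGo]
      cases hfind : List.find? (fun q => q.isPrefixOf (c :: t)) pvPats with
      | some q =>
        show '1' :: pvSubGo fuel (t.drop (q.length - 1)) =
          '1' :: pvScanS pvPats (t.drop (q.length - 1))
        rw [ih (t.drop (q.length - 1)) (by simp [List.length_drop]; omega)]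
      | none =>
        show c :: pvSubGo fuel t = c :: pvScanS pvPats t
        rw [ih t (by omega)]

theorem pv_bridgeA (ps : List (String × String)) :
    ∀ (s : String), ps.foldl (fun tp pv => PySem.Str.replace tp pv.1 pv.2) s =
      String.ofList ((ps.map (fun pv => (pv.1.toList, pv.2.toList))).foldl
        (fun t pv => PySem.Chars.replace t pv.1 pv.2) s.toList) := by
  induction ps with
  | nil => intro s; simp
  | cons pv ps' ih =>
    intro s
    simp only [List.foldl_cons, List.map_cons]
    rw [ih (PySem.Str.replace s pv.1 pv.2), PySem.Str.toList_replace]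

theorem pv_chars_eq (l : List Char) :
    pvPats.foldl (fun t p => PySem.Chars.replace t p ['1']) l = pvScanS pvPats l := by
  have hcongr : pvPats.foldl (fun t p => PySem.Chars.replace t p ['1']) l =
      pvPats.foldl (fun t p => pvRep1 p t) l := by
    apply PySem.List.foldl_congr_mem
    intro a x hx
    apply pv_replace_eq_rep1
    have := pvPats_ok x hx
    intro h; subst h; simp [pvPatOk] at this
  rw [hcongr]
  have := pv_fold pvPats [] pvPats_ok (by simp) l
  rw [pv_scan_nil] at this
  simpa using this

-- ===== VERDICT (by name: the statement is the Claim_ definition above) =====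
theorem replace_path_params_spec : Claim_equal_replace_path_params := by
  intro path _
  show replace_path_params path = replace_path_params_alt path
  rw [replace_path_params, replace_path_params_alt]
  rw [pv_bridgeA]
  refine congrArg String.ofList ?_
  rw [show (([("{id}", "1"), ("{studentId}", "1"), ("{medicationId}", "1"),
     ("{appointmentId}", "1"), ("{userId}", "1"), ("{recordId}", "1"),
     ("{reportId}", "1"), ("{contactId}", "1"), ("{incidentId}", "1"),
     ("{itemId}", "1"), ("{vendorId}", "1"), ("{orderId}", "1"),
     ("{messageId}", "1"), ("{broadcastId}", "1"), ("{documentId}", "1"),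
     ("{roleId}", "1"), ("{permissionId}", "1"), ("{districtId}", "1"),
     ("{schoolId}", "1"), ("{administrationId}", "1"), ("{logId}", "1"),
     ("{assessmentId}", "1")] : List (String × String)).map
       (fun pv => (pv.1.toList, pv.2.toList))) = pvPats.map (fun p => (p, ['1'])) by decide]
  rw [List.foldl_map]
  rw [pv_subGo_eq_scan path.toList.length path.toList (le_refl _)]
  exact pv_chars_eq path.toList
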